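-- pv_equiv track=rewrite | github.com/MahanAzadBeast/VerdicaGNOSISLEAP | demo_cell_line_model.py | get_key_genomic_features
-- ===== SOURCE A (Python) =====
-- def get_key_genomic_features(genomics):
--     """Extract key genomic features for display"""
--     key_features = []
--
--     # Check mutations
--     mutations = [k.replace('_mutation', '') for k, v in genomics.items() if 'mutation' in k and v == 1]
--     if mutations:
--         key_features.append(f"Mutations: {', '.join(mutations)}")
--
--     # Check CNVs
--     amplifications = [k.replace('_cnv', '') for k, v in genomics.items() if 'cnv' in k and v == 1]
--     deletions = [k.replace('_cnv', '') for k, v in genomics.items() if 'cnv' in k and v == -1]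
--
--     if amplifications:
--         key_features.append(f"Amplified: {', '.join(amplifications)}")
--     if deletions:
--         key_features.append(f"Deleted: {', '.join(deletions)}")
--
--     return "; ".join(key_features) if key_features else "No major alterations"
-- ===== SOURCE B (Python) =====
-- def get_key_genomic_features(genomics):
--     """Extract key genomic features for display.
--
--     Walks the items in reverse and accumulates each category's joined display
--     string directly, back-to-front (no intermediate lists, no join() calls).
--     """
--     mut_s = amp_s = del_s = None
--     for k, v in reversed(list(genomics.items())):
--         if 'mutation' in k and v == 1:
--             name = k.replace('_mutation', '')
--             mut_s = name if mut_s is None else name + ", " + mut_s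
--         if 'cnv' in k:
--             name = k.replace('_cnv', '')
--             if v == 1:
--                 amp_s = name if amp_s is None else name + ", " + amp_s
--             elif v == -1:
--                 del_s = name if del_s is None else name + ", " + del_s
--     out = None
--     for label, s in (("Mutations", mut_s), ("Amplified", amp_s), ("Deleted", del_s)):
--         if s is not None:
--             seg = label + ": " + s
--             out = seg if out is None else out + "; " + seg
--     return out if out is not None else "No major alterations"
-- ===== Notes on version B (the rewrite author's own statement) =====
-- stated objective: alternative
-- what changed: Instead of building three lists with filtering comprehensions and join()-ing them, B walks the items once in reverse and accumulates each category's joined display string directly back-to-front in Option-like string accumulators (no intermediate lists, no join calls), then folds the three labelled segments into the final string the same way.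
import Mathlib
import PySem

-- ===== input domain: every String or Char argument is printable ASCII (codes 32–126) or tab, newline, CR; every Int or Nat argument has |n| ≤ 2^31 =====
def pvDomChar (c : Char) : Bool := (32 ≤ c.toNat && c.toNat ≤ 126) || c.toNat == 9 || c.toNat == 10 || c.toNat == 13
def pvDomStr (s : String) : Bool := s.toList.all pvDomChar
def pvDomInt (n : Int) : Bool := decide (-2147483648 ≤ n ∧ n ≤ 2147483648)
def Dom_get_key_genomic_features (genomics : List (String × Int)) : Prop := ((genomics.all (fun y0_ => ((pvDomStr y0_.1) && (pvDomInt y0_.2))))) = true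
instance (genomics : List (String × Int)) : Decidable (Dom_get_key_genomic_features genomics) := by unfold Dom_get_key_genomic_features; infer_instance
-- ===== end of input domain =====

-- B walks the items in reverse, accumulating each category's joined display string
-- directly back-to-front (Option String accumulators, no intermediate lists, no join) ("alternative").

-- ===== PORT A =====
-- three filtering comprehensions over genomics.items(), then an if-chain of appends and a join
def get_key_genomic_features (genomics : List (String × Int)) : String :=
  let mutations := (genomics.filter (fun p => PySem.Str.isIn "mutation" p.1 && p.2 == 1)).map
      (fun p => PySem.Str.replace p.1 "_mutation" "")
  let kf1 : List String :=
    if mutations.isEmpty then [] else ["Mutations: " ++ PySem.Str.join ", " mutations]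
  let amplifications := (genomics.filter (fun p => PySem.Str.isIn "cnv" p.1 && p.2 == 1)).map
      (fun p => PySem.Str.replace p.1 "_cnv" "")
  let deletions := (genomics.filter (fun p => PySem.Str.isIn "cnv" p.1 && p.2 == -1)).map
      (fun p => PySem.Str.replace p.1 "_cnv" "")
  let kf2 := if amplifications.isEmpty then kf1 else kf1 ++ ["Amplified: " ++ PySem.Str.join ", " amplifications]
  let kf3 := if deletions.isEmpty then kf2 else kf2 ++ ["Deleted: " ++ PySem.Str.join ", " deletions]
  if kf3.isEmpty then "No major alterations" else PySem.Str.join "; " kf3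

-- ===== PORT B =====
-- 'name if s is None else name + ", " + s'
def gkgfPrepend (name : String) (s : Option String) : Option String :=
  match s with
  | none => some name
  | some t => some (name ++ ", " ++ t)

-- the body of Source B's reversed loop (reversed iteration + prepend = List.foldr)
def gkgfStep (p : String × Int) (acc : Option String × Option String × Option String) :
    Option String × Option String × Option String :=
  let acc1 := if PySem.Str.isIn "mutation" p.1 && p.2 == 1 then
      (gkgfPrepend (PySem.Str.replace p.1 "_mutation" "") acc.1, acc.2.1, acc.2.2) else acc
  if PySem.Str.isIn "cnv" p.1 then
    let name := PySem.Str.replace p.1 "_cnv" ""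
    if p.2 == 1 then (acc1.1, gkgfPrepend name acc1.2.1, acc1.2.2)
    else if p.2 == -1 then (acc1.1, acc1.2.1, gkgfPrepend name acc1.2.2)
    else acc1
  else acc1

-- Source B's second loop body: fold the three labelled segments into one Option String
def gkgfSeg (o : Option String) (p : String × Option String) : Option String :=
  match p.2 with
  | none => o
  | some s =>
    match o with
    | none => some (p.1 ++ ": " ++ s)
    | some t => some (t ++ "; " ++ (p.1 ++ ": " ++ s))

def get_key_genomic_features_alt (genomics : List (String × Int)) : String :=
  let r := genomics.foldr gkgfStep (none, none, none)
  let out := [("Mutations", r.1), ("Amplified", r.2.1), ("Deleted", r.2.2)].foldl gkgfSeg none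
  -- 'return out if out is not None else "No major alterations"'
  out.getD "No major alterations"

-- ===== PRECONDITION & SPEC =====
def Spec_get_key_genomic_features (genomics : List (String × Int)) (out : String) : Prop := out = get_key_genomic_features_alt genomics
instance (genomics : List (String × Int)) (out : String) : Decidable (Spec_get_key_genomic_features genomics out) := by unfold Spec_get_key_genomic_features; infer_instance

-- ===== CLAIM (what is proved, stated in full; the proofs are below) =====
def Claim_equal_get_key_genomic_features : Prop := ∀ (genomics : List (String × Int)), Dom_get_key_genomic_features genomics → Spec_get_key_genomic_features genomics (get_key_genomic_features genomics)

-- ===== LEMMAS AND PROOFS =====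

-- the joined string B accumulates per category, as a function of A's list for it
def optJoin (l : List String) : Option String :=
  match l with
  | [] => none
  | _ => some (PySem.Str.join ", " l)

theorem gkgfPrepend_optJoin (name : String) (xs : List String) :
    gkgfPrepend name (optJoin xs) = optJoin (name :: xs) := by
  cases xs with
  | nil => simp [gkgfPrepend, optJoin, PySem.Str.join]
  | cons y t =>
    simp only [gkgfPrepend, optJoin, PySem.Str.join, Option.some.injEq]
    apply String.toList_inj.mp
    simp [PySem.Chars.join_cons_cons]

-- loop invariant: B's reverse fold computes the optJoin of A's three filtered-and-mapped lists
theorem gkgf_foldr_eq (genomics : List (String × Int)) :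
    genomics.foldr gkgfStep (none, none, none) =
      (optJoin ((genomics.filter (fun p => PySem.Str.isIn "mutation" p.1 && p.2 == 1)).map
          (fun p => PySem.Str.replace p.1 "_mutation" "")),
       optJoin ((genomics.filter (fun p => PySem.Str.isIn "cnv" p.1 && p.2 == 1)).map
          (fun p => PySem.Str.replace p.1 "_cnv" "")),
       optJoin ((genomics.filter (fun p => PySem.Str.isIn "cnv" p.1 && p.2 == -1)).map
          (fun p => PySem.Str.replace p.1 "_cnv" ""))) := by
  induction genomics with
  | nil => simp [optJoin]
  | cons p t ih =>
    simp only [List.foldr_cons, ih, gkgfStep, List.filter_cons]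
    split_ifs <;> simp_all [gkgfPrepend_optJoin]

-- optJoin, written with an isEmpty test
theorem optJoin_eq (l : List String) :
    optJoin l = if l.isEmpty then none else some (PySem.Str.join ", " l) := by
  cases l <;> rfl

-- the two segment-assembly phases agree, for any emptiness flags and joined strings
theorem gkgf_assemble (b1 b2 b3 : Bool) (j1 j2 j3 : String) :
    (let kf1 : List String := if b1 then [] else ["Mutations: " ++ j1]
     let kf2 := if b2 then kf1 else kf1 ++ ["Amplified: " ++ j2]
     let kf3 := if b3 then kf2 else kf2 ++ ["Deleted: " ++ j3]
     if kf3.isEmpty then "No major alterations" else PySem.Str.join "; " kf3) =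
    (([("Mutations", if b1 then none else some j1),
       ("Amplified", if b2 then none else some j2),
       ("Deleted", if b3 then none else some j3)].foldl gkgfSeg none).getD
         "No major alterations") := by
  cases b1 <;> cases b2 <;> cases b3 <;>
    simp only [gkgfSeg, List.foldl_cons, List.foldl_nil, ite_true, ite_false,
      List.nil_append, List.cons_append, List.isEmpty_nil, List.isEmpty_cons,
      Bool.false_eq_true, Option.getD_some, Option.getD_none] <;>
    (apply String.toList_inj.mp
     simp [PySem.Str.join, PySem.Chars.join_cons_cons, PySem.Chars.join_singleton,
       List.append_assoc])

-- ===== VERDICT (by name: the statement is the Claim_ definition above) =====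
theorem get_key_genomic_features_spec : Claim_equal_get_key_genomic_features := by
  intro genomics _
  unfold Spec_get_key_genomic_features get_key_genomic_features get_key_genomic_features_alt
  rw [gkgf_foldr_eq, optJoin_eq, optJoin_eq, optJoin_eq]
  exact gkgf_assemble _ _ _ _ _ _
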